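-- pv_equiv track=rewrite | github.com/kartikvasnani07/sentinel | assistant/gui_server.py | _extract_leading_verb
-- ===== SOURCE A (Python) =====
-- def _extract_leading_verb(text):
--     lowered = str(text or "").strip().lower()
--     if not lowered:
--         return ""
--     verbs = [
--         "turn on",
--         "turn off",
--         "switch on",
--         "switch off",
--         "enable",
--         "disable",
--         "open",
--         "close",
--         "start",
--         "stop",
--         "play",
--         "set",
--         "list",
--         "show",
--         "delete",
--         "remove",
--         "erase",
--         "create",
--         "make",
--         "move",
--         "copy",
--         "duplicate",
--         "rename",
--         "shutdown",
--         "restart",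
--         "sleep",
--         "read",
--         "draw",
--         "search",
--         "find",
--     ]
--     for verb in verbs:
--         if lowered.startswith(verb + " ") or lowered == verb:
--             return verb
--     return ""
-- ===== SOURCE B (Python) =====
-- def _extract_leading_verb(text):
--     lowered = str(text or "").strip().lower()
--     if not lowered:
--         return ""
--     TWO_WORD = {"turn on", "turn off", "switch on", "switch off"}
--     ONE_WORD = {"enable", "disable", "open", "close", "start", "stop", "play",
--                 "set", "list", "show", "delete", "remove", "erase", "create",
--                 "make", "move", "copy", "duplicate", "rename", "shutdown",
--                 "restart", "sleep", "read", "draw", "search", "find"}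
--     i = lowered.find(" ")
--     if i < 0:
--         return lowered if lowered in ONE_WORD else ""
--     first = lowered[:i]
--     rest = lowered[i + 1:]
--     j = rest.find(" ")
--     second = rest if j < 0 else rest[:j]
--     two = first + " " + second
--     if two in TWO_WORD:
--         return two
--     return first if first in ONE_WORD else ""
-- ===== Notes on version B (the rewrite author's own statement) =====
-- stated objective: alternative
-- what changed: Instead of scanning the ordered list of 30 verbs with a startswith test of each verb plus a trailing space, B extracts the first one or two space-separated tokens of the lowered text once (via find and slicing) and tests them by membership in a two-word-verb set and a one-word-verb set.
import Mathlib
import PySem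

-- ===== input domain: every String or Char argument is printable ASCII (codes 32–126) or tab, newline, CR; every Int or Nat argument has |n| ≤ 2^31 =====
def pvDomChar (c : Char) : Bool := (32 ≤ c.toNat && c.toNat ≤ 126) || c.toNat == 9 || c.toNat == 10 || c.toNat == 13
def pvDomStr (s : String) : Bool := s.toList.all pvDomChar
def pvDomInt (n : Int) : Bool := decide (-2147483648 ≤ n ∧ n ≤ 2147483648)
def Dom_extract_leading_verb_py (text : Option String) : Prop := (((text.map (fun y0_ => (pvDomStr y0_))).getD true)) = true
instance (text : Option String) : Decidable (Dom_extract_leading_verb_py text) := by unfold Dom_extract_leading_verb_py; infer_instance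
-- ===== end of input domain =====

-- B replaces A's ordered 30-verb prefix scan by extracting the first one or two space-separated
-- tokens once (find + slices) and testing them against two verb sets (objective: alternative).

-- ===== PORT A =====
-- the 30 verbs, in A's order
def pvVerbs : List (List Char) :=
  ["turn on".toList, "turn off".toList, "switch on".toList, "switch off".toList,
   "enable".toList, "disable".toList, "open".toList, "close".toList, "start".toList,
   "stop".toList, "play".toList, "set".toList, "list".toList, "show".toList,
   "delete".toList, "remove".toList, "erase".toList, "create".toList, "make".toList,
   "move".toList, "copy".toList, "duplicate".toList, "rename".toList, "shutdown".toList,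
   "restart".toList, "sleep".toList, "read".toList, "draw".toList, "search".toList,
   "find".toList]

-- lowered.startswith(verb + " ") or lowered == verb
def pvCondA (l v : List Char) : Bool :=
  PySem.Chars.startswith l (v ++ [' ']) || l == v

-- the 'for verb in verbs' loop: first verb whose condition holds, else ""
def pvLoopA (vs : List (List Char)) (l : List Char) : List Char :=
  match vs with
  | [] => []
  | v :: rest => if pvCondA l v then v else pvLoopA rest l

def extract_leading_verb_py (text : Option String) : String :=
  let lowered := PySem.Chars.lower (PySem.Chars.strip (text.getD "").toList)
  if lowered = [] then "" else String.ofList (pvLoopA pvVerbs lowered)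

-- ===== PORT B =====
def pvTwoWord : List (List Char) :=
  ["turn on".toList, "turn off".toList, "switch on".toList, "switch off".toList]

def pvOneWord : List (List Char) :=
  ["enable".toList, "disable".toList, "open".toList, "close".toList, "start".toList,
   "stop".toList, "play".toList, "set".toList, "list".toList, "show".toList,
   "delete".toList, "remove".toList, "erase".toList, "create".toList, "make".toList,
   "move".toList, "copy".toList, "duplicate".toList, "rename".toList, "shutdown".toList,
   "restart".toList, "sleep".toList, "read".toList, "draw".toList, "search".toList,
   "find".toList]

-- Source B from 'i = lowered.find(" ")' on, after the shared strip/lower and empty guard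
def pvCoreB (l : List Char) : List Char :=
  let i := PySem.Chars.find l [' ']
  if i < 0 then (if l ∈ pvOneWord then l else [])
  else
    let first := PySem.List.slice l none (some i)
    let rest := PySem.List.slice l (some (i + 1)) none
    let j := PySem.Chars.find rest [' ']
    let second := if j < 0 then rest else PySem.List.slice rest none (some j)
    let two := first ++ ' ' :: second
    if two ∈ pvTwoWord then two
    else if first ∈ pvOneWord then first else []

def extract_leading_verb_py_alt (text : Option String) : String :=
  let lowered := PySem.Chars.lower (PySem.Chars.strip (text.getD "").toList)
  if lowered = [] then "" else String.ofList (pvCoreB lowered)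

-- ===== PRECONDITION & SPEC =====
def Spec_extract_leading_verb_py (text : Option String) (out : String) : Prop := out = extract_leading_verb_py_alt text
instance (text : Option String) (out : String) : Decidable (Spec_extract_leading_verb_py text out) := by unfold Spec_extract_leading_verb_py; infer_instance

-- ===== CLAIM (what is proved, stated in full; the proofs are below) =====
def Claim_equal_extract_leading_verb_py : Prop := ∀ (text : Option String), Dom_extract_leading_verb_py text → Spec_extract_leading_verb_py text (extract_leading_verb_py text)

-- ===== LEMMAS AND PROOFS =====

def pvTok (l : List Char) : List Char := l.takeWhile (· ≠ ' ')
def pvRest (l : List Char) : List Char := (l.dropWhile (· ≠ ' ')).tail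

theorem pvDecomp (l : List Char) (h : ' ' ∈ l) :
    l = pvTok l ++ ' ' :: pvRest l := by
  rw [pvTok, pvRest]
  induction l with
  | nil => simp at h
  | cons c cs ih =>
    by_cases hc : c = ' '
    · subst hc; simp
    · rw [List.mem_cons] at h
      have h' : ' ' ∈ cs := h.resolve_left (by intro hh; exact hc hh.symm)
      simp only [List.takeWhile_cons, List.dropWhile_cons]
      simp [hc]
      simpa using ih h'

theorem pvPrefixTok (a t z r : List Char) (ha : ' ' ∉ a) (ht : ' ' ∉ t) :
    a ++ ' ' :: z <+: t ++ ' ' :: r ↔ a = t ∧ z <+: r := by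
  induction a generalizing t with
  | nil =>
    cases t with
    | nil => simp
    | cons c ts =>
      simp only [List.nil_append, List.cons_append, List.cons_prefix_cons]
      have : c ≠ ' ' := by intro hh; exact ht (by simp [hh])
      simp [this.symm]
  | cons x as ih =>
    cases t with
    | nil =>
      simp only [List.cons_append, List.nil_append, List.cons_prefix_cons]
      have : x ≠ ' ' := by intro hh; exact ha (by simp [hh])
      simp [this]
    | cons c ts =>
      simp only [List.cons_append, List.cons_prefix_cons]
      have ha' : ' ' ∉ as := fun hh => ha (by simp [hh])
      have ht' : ' ' ∉ ts := fun hh => ht (by simp [hh])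
      rw [ih ts ha' ht']
      constructor
      · rintro ⟨rfl, rfl, hz⟩; exact ⟨rfl, hz⟩
      · rintro ⟨he, hz⟩
        injection he with h1 h2
        exact ⟨h1, h2, hz⟩

theorem pvAppendInj (a t b s : List Char) (ha : ' ' ∉ a) (ht : ' ' ∉ t) :
    a ++ ' ' :: b = t ++ ' ' :: s ↔ a = t ∧ b = s := by
  constructor
  · intro h
    have h1 : a ++ ' ' :: b <+: t ++ ' ' :: s := h ▸ List.prefix_refl _
    have h2 : t ++ ' ' :: s <+: a ++ ' ' :: b := h ▸ List.prefix_refl _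
    obtain ⟨rfl, hz⟩ := (pvPrefixTok a t b s ha ht).1 h1
    obtain ⟨-, hz'⟩ := (pvPrefixTok _ _ _ _ ht ht).1 h2
    exact ⟨rfl, hz.sublist.eq_of_length_le hz'.length_le⟩
  · rintro ⟨rfl, rfl⟩; rfl

theorem pvTok_nospace (l : List Char) : ' ' ∉ pvTok l := by
  intro h
  have := List.mem_takeWhile_imp h
  simp at this

theorem pvTok_of_nospace (l : List Char) (h : ' ' ∉ l) : pvTok l = l := by
  rw [pvTok, List.takeWhile_eq_self_iff]
  intro x hx
  simp
  rintro rfl; exact h hx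

theorem pvCondA_one (v l : List Char) (hv : ' ' ∉ v) : pvCondA l v = (v == pvTok l) := by
  rw [Bool.eq_iff_iff]
  simp only [pvCondA, Bool.or_eq_true, PySem.Chars.startswith_iff, beq_iff_eq]
  by_cases hsp : ' ' ∈ l
  · conv_lhs => rw [pvDecomp l hsp]
    rw [show v ++ [' '] = v ++ ' ' :: [] from rfl, pvPrefixTok v _ [] _ hv (pvTok_nospace l)]
    constructor
    · rintro (⟨rfl, -⟩ | rfl)
      · rfl
      · exact absurd (by simp) hv
    · rintro rfl; exact Or.inl ⟨rfl, List.nil_prefix⟩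
  · rw [pvTok_of_nospace l hsp]
    constructor
    · rintro (hp | rfl)
      · exact absurd (hp.mem (by simp)) hsp
      · rfl
    · rintro rfl; exact Or.inr rfl

theorem pvCondA_two (a b l : List Char) (ha : ' ' ∉ a) (hb : ' ' ∉ b) :
    pvCondA l (a ++ ' ' :: b) =
      if ' ' ∈ l then (a == pvTok l && b == pvTok (pvRest l)) else false := by
  by_cases hsp : ' ' ∈ l
  · simp only [hsp, if_pos]
    rw [Bool.eq_iff_iff]
    simp only [pvCondA, Bool.or_eq_true, PySem.Chars.startswith_iff, Bool.and_eq_true, beq_iff_eq]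
    conv_lhs => rw [pvDecomp l hsp]
    rw [show (a ++ ' ' :: b) ++ [' '] = a ++ ' ' :: (b ++ [' ']) by simp,
        pvPrefixTok a _ _ _ ha (pvTok_nospace l),
        pvAppendInj _ _ _ _ (pvTok_nospace l) ha]
    constructor
    · rintro (⟨rfl, hp⟩ | ⟨rfl, rfl⟩)
      · refine ⟨rfl, ?_⟩
        -- b ++ [' '] <+: pvRest l  →  b = pvTok (pvRest l)
        have hr : ' ' ∈ pvRest l := (hp.mem (by simp))
        conv at hp => rw [pvDecomp _ hr]
        rw [show b ++ [' '] = b ++ ' ' :: [] from rfl,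
            pvPrefixTok b _ [] _ hb (pvTok_nospace _)] at hp
        exact hp.1
      · exact ⟨rfl, (pvTok_of_nospace _ hb).symm⟩
    · rintro ⟨rfl, rfl⟩
      by_cases hr : ' ' ∈ pvRest l
      · refine Or.inl ⟨rfl, ?_⟩
        conv_rhs => rw [pvDecomp _ hr]
        rw [show pvTok (pvRest l) ++ [' '] = pvTok (pvRest l) ++ ' ' :: [] from rfl,
            pvPrefixTok _ _ [] _ (pvTok_nospace _) (pvTok_nospace _)]
        exact ⟨rfl, List.nil_prefix⟩
      · exact Or.inr ⟨rfl, (pvTok_of_nospace _ hr).symm⟩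
  · simp only [hsp, if_neg, not_false_iff]
    rw [pvCondA, Bool.or_eq_false_iff]
    constructor
    · rw [Bool.eq_false_iff]
      intro hp
      rw [PySem.Chars.startswith_iff] at hp
      exact hsp (hp.mem (by simp))
    · rw [beq_eq_false_iff_ne]
      rintro rfl
      exact hsp (by simp)

theorem pvLoop_seg (l : List Char) (ys : List (List Char)) (c1 : List Char)
    (hy : ∀ v ∈ ys, pvCondA l v = (v == c1)) :
    pvLoopA ys l = if c1 ∈ ys then c1 else [] := by
  induction ys with
  | nil => simp [pvLoopA]
  | cons v vs ih =>
    rw [pvLoopA, hy v (by simp)]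
    by_cases hv : v = c1
    · subst hv; simp
    · rw [if_neg (by simp [hv]), ih (fun w hw => hy w (by simp [hw]))]
      simp [List.mem_cons, Ne.symm hv]

theorem pvLoop_two_seg (l : List Char) (xs ys : List (List Char)) (c2 c1 : List Char)
    (hx : ∀ v ∈ xs, pvCondA l v = (v == c2)) (hy : ∀ v ∈ ys, pvCondA l v = (v == c1)) :
    pvLoopA (xs ++ ys) l = if c2 ∈ xs then c2 else if c1 ∈ ys then c1 else [] := by
  induction xs with
  | nil => simpa using pvLoop_seg l ys c1 hy
  | cons v vs ih =>
    rw [List.cons_append, pvLoopA, hx v (by simp)]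
    by_cases hv : v = c2
    · subst hv; simp
    · rw [if_neg (by simp [hv]), ih (fun w hw => hx w (by simp [hw]))]
      simp [List.mem_cons, Ne.symm hv]

theorem pvSpace_infix (l : List Char) : [' '] <:+: l ↔ ' ' ∈ l := by
  constructor
  · intro h; exact h.subset (by simp)
  · intro h
    obtain ⟨s, t, rfl⟩ := List.append_of_mem h
    exact ⟨s, t, by simp⟩

theorem pvFind_nonneg (l : List Char) (h : ' ' ∈ l) : 0 ≤ PySem.Chars.find l [' '] := by
  rw [PySem.Chars.find_nonneg_iff, pvSpace_infix]; exact h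

theorem pvFind_neg (l : List Char) : PySem.Chars.find l [' '] < 0 ↔ ' ' ∉ l := by
  constructor
  · intro h hm; have := pvFind_nonneg l hm; omega
  · intro hm
    have := (PySem.Chars.find_eq_neg_one_iff (s := l) (sub := [' '])).2
      (by rw [pvSpace_infix]; exact hm)
    omega

theorem pvSingle_prefix (c : Char) (xs : List Char) : [c] <+: xs ↔ xs.head? = some c := by
  cases xs with
  | nil => simp
  | cons x t => simp [List.cons_prefix_cons, eq_comm]

theorem pvFind_toNat (l : List Char) (h : ' ' ∈ l) :
    (PySem.Chars.find l [' ']).toNat = (pvTok l).length := by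
  obtain ⟨hp, hmin⟩ := PySem.Chars.find_spec (s := l) (sub := [' ']) (pvFind_nonneg l h)
  rw [pvSingle_prefix, List.head?_drop] at hp
  set n := (PySem.Chars.find l [' ']).toNat with hn
  set m := (pvTok l).length with hm
  rcases Nat.lt_trichotomy n m with hlt | heq | hgt
  · exfalso
    rw [pvDecomp l h, List.getElem?_append_left (by omega)] at hp
    have : (pvTok l)[n]'(by omega) = ' ' := by
      rw [List.getElem?_eq_getElem (by omega)] at hp
      exact Option.some.inj hp
    exact pvTok_nospace l (this ▸ List.getElem_mem _)
  · exact heq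
  · refine absurd (hmin m (by omega)) ?_
    rw [not_not, pvSingle_prefix, List.head?_drop, pvDecomp l h,
        List.getElem?_append_right (by omega), ← hm, Nat.sub_self]
    rfl

theorem pvFind_first (l : List Char) (h : ' ' ∈ l) :
    PySem.List.slice l none (some (PySem.Chars.find l [' '])) = pvTok l := by
  set t := pvTok l with hts
  set r := pvRest l with hrs
  rw [PySem.List.slice_to l (pvFind_nonneg l h), pvFind_toNat l h, ← hts,
      show l = t ++ ' ' :: r from pvDecomp l h]
  exact List.take_left

theorem pvFind_rest (l : List Char) (h : ' ' ∈ l) :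
    PySem.List.slice l (some (PySem.Chars.find l [' '] + 1)) none = pvRest l := by
  have h0 := pvFind_nonneg l h
  set t := pvTok l with hts
  set r := pvRest l with hrs
  have ht : (PySem.Chars.find l [' '] + 1).toNat = t.length + 1 := by
    have := pvFind_toNat l h; rw [← hts] at this; omega
  rw [PySem.List.slice_from l (by omega), ht,
      show l = t ++ ' ' :: r from pvDecomp l h,
      show t ++ ' ' :: r = (t ++ [' ']) ++ r by simp,
      show t.length + 1 = (t ++ [' ']).length by simp]
  exact List.drop_left

theorem pvOneWord_nospace : ∀ v ∈ pvOneWord, ' ' ∉ v := by decide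

theorem pvMain (l : List Char) : pvLoopA pvVerbs l = pvCoreB l := by
  have hsplit : pvVerbs = pvTwoWord ++ pvOneWord := rfl
  by_cases hsp : ' ' ∈ l
  · have h0 := pvFind_nonneg l hsp
    have hy : ∀ v ∈ pvOneWord, pvCondA l v = (v == pvTok l) :=
      fun v hv => pvCondA_one v l (pvOneWord_nospace v hv)
    have hx : ∀ v ∈ pvTwoWord, pvCondA l v = (v == pvTok l ++ ' ' :: pvTok (pvRest l)) := by
      intro v hv
      fin_cases hv
      · rw [show "turn on".toList = "turn".toList ++ ' ' :: "on".toList from rfl,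
            pvCondA_two _ _ l (by decide) (by decide), if_pos hsp, Bool.eq_iff_iff]
        simp only [Bool.and_eq_true, beq_iff_eq]
        rw [pvAppendInj _ _ _ _ (by decide) (pvTok_nospace l)]
      · rw [show "turn off".toList = "turn".toList ++ ' ' :: "off".toList from rfl,
            pvCondA_two _ _ l (by decide) (by decide), if_pos hsp, Bool.eq_iff_iff]
        simp only [Bool.and_eq_true, beq_iff_eq]
        rw [pvAppendInj _ _ _ _ (by decide) (pvTok_nospace l)]
      · rw [show "switch on".toList = "switch".toList ++ ' ' :: "on".toList from rfl,
            pvCondA_two _ _ l (by decide) (by decide), if_pos hsp, Bool.eq_iff_iff]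
        simp only [Bool.and_eq_true, beq_iff_eq]
        rw [pvAppendInj _ _ _ _ (by decide) (pvTok_nospace l)]
      · rw [show "switch off".toList = "switch".toList ++ ' ' :: "off".toList from rfl,
            pvCondA_two _ _ l (by decide) (by decide), if_pos hsp, Bool.eq_iff_iff]
        simp only [Bool.and_eq_true, beq_iff_eq]
        rw [pvAppendInj _ _ _ _ (by decide) (pvTok_nospace l)]
    rw [hsplit, pvLoop_two_seg l _ _ _ _ hx hy]
    rw [pvCoreB]
    simp only [show ¬ (PySem.Chars.find l [' '] < 0) from by omega, if_false]
    rw [pvFind_first l hsp, pvFind_rest l hsp]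
    by_cases hr : ' ' ∈ pvRest l
    · have hlt : ¬ (PySem.Chars.find (pvRest l) [' '] < 0) := by
        rw [pvFind_neg]; exact fun hh => hh hr
      rw [if_neg hlt, pvFind_first _ hr]
    · have hlt : PySem.Chars.find (pvRest l) [' '] < 0 := (pvFind_neg _).2 hr
      rw [if_pos hlt, pvTok_of_nospace _ hr]
  · have hy : ∀ v ∈ pvOneWord, pvCondA l v = (v == l) := by
      intro v hv
      rw [pvCondA_one v l (pvOneWord_nospace v hv), pvTok_of_nospace l hsp]
    have hx : ∀ v ∈ pvTwoWord, pvCondA l v = (v == l) := by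
      intro v hv
      have hne : v ≠ l := by
        intro hh; subst hh
        fin_cases hv <;> exact hsp (by decide)
      rw [Bool.eq_iff_iff]
      simp only [beq_iff_eq, hne, iff_false]
      fin_cases hv
      · rw [show "turn on".toList = "turn".toList ++ ' ' :: "on".toList from rfl,
            pvCondA_two _ _ l (by decide) (by decide), if_neg hsp]; simp
      · rw [show "turn off".toList = "turn".toList ++ ' ' :: "off".toList from rfl,
            pvCondA_two _ _ l (by decide) (by decide), if_neg hsp]; simp
      · rw [show "switch on".toList = "switch".toList ++ ' ' :: "on".toList from rfl,
            pvCondA_two _ _ l (by decide) (by decide), if_neg hsp]; simp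
      · rw [show "switch off".toList = "switch".toList ++ ' ' :: "off".toList from rfl,
            pvCondA_two _ _ l (by decide) (by decide), if_neg hsp]; simp
    rw [hsplit, pvLoop_two_seg l _ _ _ _ hx hy]
    rw [pvCoreB]
    simp only [show PySem.Chars.find l [' '] < 0 from (pvFind_neg l).2 hsp, if_true]
    have hnm : l ∉ pvTwoWord := by
      intro hmem
      fin_cases hmem <;> exact hsp (by decide)
    rw [if_neg hnm]

-- ===== VERDICT (by name: the statement is the Claim_ definition above) =====
theorem extract_leading_verb_py_spec : Claim_equal_extract_leading_verb_py := by
  intro text _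
  unfold Spec_extract_leading_verb_py extract_leading_verb_py extract_leading_verb_py_alt
  simp only [pvMain]
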